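-- pv_equiv track=rewrite | github.com/hyun071111/card-snap-OCR | app/main.py | is_luhn_valid
-- ===== SOURCE A (Python) =====
-- def is_luhn_valid(card_number: str) -> bool:
--     """Luhn 알고리즘(Modulus 10)으로 카드 번호 유효성 검사"""
--     try:
--         num_digits, s = len(card_number), 0
--         for i, digit_char in enumerate(card_number):
--             digit = int(digit_char)
--             if (i % 2) == (num_digits % 2):
--                 digit *= 2
--             if digit > 9:
--                 digit -= 9
--             s += digit
--         return (s % 10) == 0
--     except (ValueError, TypeError):
--         return False
-- ===== SOURCE B (Python) =====
-- def is_luhn_valid(card_number: str) -> bool: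
--     """Luhn check: parse the digits back-to-front, then consume them two at a
--     time (plain digit, then doubled digit) instead of a forward pass with a
--     per-index parity comparison."""
--     try:
--         digits = [int(c) for c in reversed(card_number)]
--     except (ValueError, TypeError):
--         return False
--     total = 0
--     while digits:
--         total += digits[0]
--         if len(digits) > 1:
--             d = digits[1] * 2
--             total += d - 9 if d > 9 else d
--         digits = digits[2:]
--     return total % 10 == 0
-- ===== Notes on version B (the rewrite author's own statement) =====
-- stated objective: alternative
-- what changed: Replaces the forward enumerate loop with a per-index parity comparison against len(card_number) by parsing the digits in reverse and consuming them pairwise (plain digit, then doubled digit) two at a time.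
import Mathlib
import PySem

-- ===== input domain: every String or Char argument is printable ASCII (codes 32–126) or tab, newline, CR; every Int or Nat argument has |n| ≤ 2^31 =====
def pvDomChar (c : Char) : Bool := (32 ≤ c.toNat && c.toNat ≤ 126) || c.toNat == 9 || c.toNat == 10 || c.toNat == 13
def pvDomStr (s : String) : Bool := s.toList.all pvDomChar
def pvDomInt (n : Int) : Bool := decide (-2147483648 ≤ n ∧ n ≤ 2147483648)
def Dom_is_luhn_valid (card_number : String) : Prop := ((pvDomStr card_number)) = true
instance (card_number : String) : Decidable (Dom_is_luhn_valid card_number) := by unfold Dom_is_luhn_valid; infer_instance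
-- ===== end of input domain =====

-- B consumes the reversed digit list pairwise (plain, then doubled) instead of A's
-- forward enumerate loop with a per-index parity comparison; same cost, different decomposition.

-- ===== PORT A =====
-- the forward loop: state s, per index i compare parity with num_digits; none = ValueError escaped to 'return False'
def luhnA_go (num_digits : Int) : List (Int × Char) → Int → Option Int
  | [], s => some s
  | (i, c) :: rest, s =>
    match PySem.Int.ofStr? (String.ofList [c]) with
    | none => none
    | some digit0 =>
      let digit1 := if PySem.Int.mod i 2 = PySem.Int.mod num_digits 2 then digit0 * 2 else digit0
      let digit2 := if digit1 > 9 then digit1 - 9 else digit1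
      luhnA_go num_digits rest (s + digit2)

def is_luhn_valid (card_number : String) : Bool :=
  let cs := card_number.toList
  let num_digits : Int := cs.length
  match luhnA_go num_digits (PySem.List.enumerate cs) 0 with
  | none => false
  | some s => PySem.Int.mod s 10 == 0

-- ===== PORT B =====
-- [int(c) for c in reversed(card_number)]; none = the comprehension raised ValueError
def parseRev? : List Char → Option (List Int)
  | [] => some []
  | c :: rest =>
    match PySem.Int.ofStr? (String.ofList [c]), parseRev? rest with
    | some d, some ds => some (d :: ds)
    | _, _ => none

-- the while loop: digit 0 plain, digit 1 doubled (−9 if > 9), then digits = digits[2:]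
def luhnB_go : List Int → Int → Int
  | [], total => total
  | [d0], total => total + d0
  | d0 :: d1 :: rest, total =>
    let d := d1 * 2
    luhnB_go rest (total + d0 + (if d > 9 then d - 9 else d))

def is_luhn_valid_alt (card_number : String) : Bool :=
  match parseRev? card_number.toList.reverse with
  | none => false
  | some digits => PySem.Int.mod (luhnB_go digits 0) 10 == 0

-- ===== PRECONDITION & SPEC =====
def Spec_is_luhn_valid (card_number : String) (out : Bool) : Prop := out = is_luhn_valid_alt card_number
instance (card_number : String) (out : Bool) : Decidable (Spec_is_luhn_valid card_number out) := by unfold Spec_is_luhn_valid; infer_instance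

-- ===== CLAIM (what is proved, stated in full; the proofs are below) =====
def Claim_equal_is_luhn_valid : Prop := ∀ (card_number : String), Dom_is_luhn_valid card_number → Spec_is_luhn_valid card_number (is_luhn_valid card_number)

-- ===== LEMMAS AND PROOFS =====

-- per-digit contribution: doubled (with −9) when the flag is set
def fAdj (d : Int) (b : Bool) : Int := if b then (if d * 2 > 9 then d * 2 - 9 else d * 2) else d

-- alternating-flag sum: the common value both loops compute
def altsum : List Int → Bool → Int
  | [], _ => 0
  | d :: ds, b => fAdj d b + altsum ds (!b)

theorem flag_flip (i n : Int) : (PySem.Int.mod (i + 1) 2 = PySem.Int.mod n 2) ↔ ¬ (PySem.Int.mod i 2 = PySem.Int.mod n 2) := by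
  simp only [PySem.Int.mod_eq_emod_of_pos (show (0:Int) < 2 by norm_num)]
  omega

-- every single printable-ASCII character that int() accepts parses to a digit 0..9
def pvCharOk (n : Nat) : Bool :=
  match PySem.Int.ofChars? [Char.ofNat n] with
  | none => true
  | some d => decide (0 ≤ d ∧ d ≤ 9)

theorem pvCharOk_lt : ∀ n : Nat, n < 128 → pvCharOk n = true := by decide

theorem parsed_le (c : Char) (hdom : pvDomChar c = true) {d : Int}
    (h : PySem.Int.ofStr? (String.ofList [c]) = some d) : 0 ≤ d ∧ d ≤ 9 := by
  have hlt : c.toNat < 128 := by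
    unfold pvDomChar at hdom; simp only [Bool.or_eq_true, Bool.and_eq_true, decide_eq_true_eq,
      beq_iff_eq] at hdom; omega
  have hok := pvCharOk_lt c.toNat hlt
  unfold pvCharOk at hok
  rw [Char.ofNat_toNat] at hok
  have he : PySem.Int.ofStr? (String.ofList [c]) = PySem.Int.ofChars? [c] := by
    simp [PySem.Int.ofStr?]
  rw [he] at h
  rw [h] at hok
  simpa using hok

theorem luhnA_go_eq (n : Int) (cs : List Char) (hdom : ∀ c ∈ cs, pvDomChar c = true) : ∀ (i s : Int),
    luhnA_go n (PySem.List.enumerate cs i) s =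
      (parseRev? cs).map (fun ds => s + altsum ds (decide (PySem.Int.mod i 2 = PySem.Int.mod n 2))) := by
  induction cs with
  | nil => intro i s; simp [PySem.List.enumerate_nil, luhnA_go, parseRev?, altsum]
  | cons c rest ih =>
    intro i s
    rw [PySem.List.enumerate_cons]
    show luhnA_go n ((i, c) :: PySem.List.enumerate rest (i + 1)) s = _
    simp only [luhnA_go, parseRev?]
    cases hc : PySem.Int.ofStr? (String.ofList [c]) with
    | none => simp
    | some d =>
      dsimp only
      rw [ih (fun x hx => hdom x (List.mem_cons_of_mem _ hx)) (i + 1) _]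
      cases hr : parseRev? rest with
      | none => simp
      | some ds =>
        simp only [Option.map_some]
        congr 1
        have hb := parsed_le c (hdom c List.mem_cons_self) hc
        by_cases hp : PySem.Int.mod i 2 = PySem.Int.mod n 2
        · have h2 : ¬ (PySem.Int.mod (i + 1) 2 = PySem.Int.mod n 2) := by
            rw [flag_flip]; exact fun h => h hp
          simp only [altsum, fAdj, hp, h2, decide_true, decide_false, if_true, Bool.not_true]
          split <;> ring
        · have h2 : PySem.Int.mod (i + 1) 2 = PySem.Int.mod n 2 := (flag_flip i n).mpr hp
          have h9 : ¬ (d > 9) := by omega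
          simp only [altsum, fAdj, hp, h2, decide_true, decide_false, Bool.false_eq_true,
            if_false, if_neg h9, Bool.not_false]
          ring

theorem parseRev?_append (xs ys : List Char) :
    parseRev? (xs ++ ys) = (parseRev? xs).bind (fun a => (parseRev? ys).map (fun b => a ++ b)) := by
  induction xs with
  | nil => simp [parseRev?]
  | cons c rest ih =>
    simp only [List.cons_append, parseRev?, ih]
    cases PySem.Int.ofStr? (String.ofList [c]) with
    | none => rfl
    | some d =>
      cases parseRev? rest with
      | none => rfl
      | some a =>
        cases parseRev? ys <;> rfl

theorem parseRev?_reverse (l : List Char) :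
    parseRev? l.reverse = (parseRev? l).map List.reverse := by
  induction l with
  | nil => rfl
  | cons c rest ih =>
    rw [List.reverse_cons, parseRev?_append, ih]
    simp only [parseRev?]
    cases PySem.Int.ofStr? (String.ofList [c]) with
    | none => cases parseRev? rest <;> rfl
    | some d => cases parseRev? rest <;> simp

theorem parseRev?_length {l : List Char} {ds : List Int} (h : parseRev? l = some ds) :
    ds.length = l.length := by
  induction l generalizing ds with
  | nil => simp [parseRev?] at h; simp [← h]
  | cons c rest ih =>
    simp only [parseRev?] at h
    cases hc : PySem.Int.ofStr? (String.ofList [c]) <;> rw [hc] at h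
    · exact absurd h (by simp)
    · cases hr : parseRev? rest <;> rw [hr] at h
      · exact absurd h (by simp)
      · cases h; simp [ih hr]

theorem luhnB_go_eq (ds : List Int) (total : Int) : luhnB_go ds total = total + altsum ds false := by
  induction ds, total using luhnB_go.induct with
  | case1 t => simp [luhnB_go, altsum]
  | case2 d0 t => simp [luhnB_go, altsum, fAdj]
  | case3 d0 d1 rest t dd ih =>
    simp only [show (dd : Int) = d1 * 2 from rfl] at ih
    simp only [luhnB_go]
    rw [ih]
    simp only [altsum, fAdj, Bool.not_false, Bool.not_true, Bool.false_eq_true, if_false, if_true]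
    ring

theorem altsum_append (xs : List Int) (x : Int) : ∀ (b : Bool),
    altsum (xs ++ [x]) b = altsum xs b + fAdj x (xor b (decide (xs.length % 2 = 1))) := by
  induction xs with
  | nil => intro b; cases b <;> simp [altsum]
  | cons y ys ih =>
    intro b
    simp only [List.cons_append, altsum, ih (!b), List.length_cons]
    have : xor (!b) (decide (ys.length % 2 = 1)) = xor b (decide ((ys.length + 1) % 2 = 1)) := by
      rcases Nat.mod_two_eq_zero_or_one ys.length with h | h <;>
        cases b <;> simp [Nat.add_mod, h]
    rw [this]; ring_nf

theorem altsum_reverse (ds : List Int) :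
    altsum ds.reverse false = altsum ds (decide (ds.length % 2 = 0)) := by
  induction ds with
  | nil => rfl
  | cons d rest ih =>
    rw [List.reverse_cons, altsum_append, ih]
    simp only [List.length_reverse, List.length_cons]
    rcases Nat.mod_two_eq_zero_or_one rest.length with h | h <;>
      simp [altsum, Nat.add_mod, h] <;> ring

theorem flag_zero (m : Nat) :
    decide (PySem.Int.mod 0 2 = PySem.Int.mod (m : Int) 2) = decide (m % 2 = 0) := by
  simp only [PySem.Int.mod_eq_emod_of_pos (show (0:Int) < 2 by norm_num)]
  rw [decide_eq_decide]
  omega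

-- ===== VERDICT (by name: the statement is the Claim_ definition above) =====
theorem is_luhn_valid_spec : Claim_equal_is_luhn_valid := by
  intro s hdom
  have hall : ∀ c ∈ s.toList, pvDomChar c = true := by
    unfold Dom_is_luhn_valid pvDomStr at hdom
    exact List.all_eq_true.mp hdom
  unfold Spec_is_luhn_valid is_luhn_valid is_luhn_valid_alt
  dsimp only
  rw [luhnA_go_eq _ _ hall, parseRev?_reverse]
  cases h : parseRev? s.toList with
  | none => rfl
  | some ds =>
    simp only [Option.map_some]
    rw [luhnB_go_eq, altsum_reverse, parseRev?_length h, zero_add, zero_add, flag_zero]
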